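-- pv_equiv track=rewrite | github.com/Nurech/Python_LTAT.03.001 | homeworks/03.31/home2.py | more_than_three
-- ===== SOURCE A (Python) =====
-- def more_than_three(products):
--     count = 0
--     result = []
--     for i in range(len(products)):
--         for j in range(i):
--             if products[j] > 3:
--                 count += 1
--         result.append(count)
--         count = 0
--     return result
-- ===== SOURCE B (Python) =====
-- def more_than_three(products):
--     result = []
--     running = 0
--     for x in products:
--         result.append(running)
--         if x > 3:
--             running += 1
--     return result
-- ===== Notes on version B (the rewrite author's own statement) =====
-- stated objective: faster
-- what changed: Replaces the quadratic re-scan of the prefix at every index by a single pass that maintains a running count of elements > 3.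
import Mathlib
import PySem

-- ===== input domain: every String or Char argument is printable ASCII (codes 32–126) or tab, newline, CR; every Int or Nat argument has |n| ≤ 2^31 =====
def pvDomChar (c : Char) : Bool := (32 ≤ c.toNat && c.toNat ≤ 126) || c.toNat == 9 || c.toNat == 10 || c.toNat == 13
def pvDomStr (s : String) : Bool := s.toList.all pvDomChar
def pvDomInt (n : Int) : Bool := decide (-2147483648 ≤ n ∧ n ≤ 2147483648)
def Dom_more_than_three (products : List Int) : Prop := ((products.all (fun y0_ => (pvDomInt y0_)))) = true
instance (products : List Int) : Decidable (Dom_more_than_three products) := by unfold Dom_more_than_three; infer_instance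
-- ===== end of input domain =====

-- B replaces A's quadratic per-index re-scan of the prefix with a single pass
-- keeping a running count of elements > 3 (asymptotic speed-up, O(n^2) → O(n)).

-- ===== PORT A =====
-- one outer step of A: re-count the prefix products[0:i], append, reset count to 0
def mttStep (ps : List Int) (st : Int × List Int) (i : Int) : Int × List Int :=
  let count := (PySem.List.pyRange 0 i 1).foldl
    (fun c j => if PySem.List.pyGetD ps j 0 > 3 then c + 1 else c) st.1
  (0, st.2 ++ [count])

def more_than_three (products : List Int) : List Int :=
  ((PySem.List.pyRange 0 (products.length : Int) 1).foldl (mttStep products) (0, [])).2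

-- ===== PORT B =====
def more_than_three_alt (products : List Int) : List Int :=
  (products.foldl
    (fun (st : List Int × Int) x =>
      (st.1 ++ [st.2], if x > 3 then st.2 + 1 else st.2))
    ([], 0)).1

-- ===== PRECONDITION & SPEC =====
def Spec_more_than_three (products : List Int) (out : List Int) : Prop := out = more_than_three_alt products
instance (products : List Int) (out : List Int) : Decidable (Spec_more_than_three products out) := by unfold Spec_more_than_three; infer_instance

-- ===== CLAIM (what is proved, stated in full; the proofs are below) =====
def Claim_equal_more_than_three : Prop := ∀ (products : List Int), Dom_more_than_three products → Spec_more_than_three products (more_than_three products)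

-- ===== LEMMAS AND PROOFS =====

-- the common value: element k is the number of elements > 3 among the first k
def mttCnt (ps : List Int) (k : Nat) : Int :=
  ((ps.take k).countP (fun x => decide (x > 3)) : Nat)

lemma mttInner (ps : List Int) (i : Nat) (hi : i ≤ ps.length) :
    (PySem.List.pyRange 0 (i : Int) 1).foldl
      (fun c j => if PySem.List.pyGetD ps j 0 > 3 then c + 1 else c) 0 = mttCnt ps i := by
  induction i with
  | zero => simp [PySem.List.pyRange_one_eq_nil, mttCnt]
  | succ k ih =>
    have hk : k < ps.length := by omega
    rw [show ((k + 1 : Nat) : Int) = (k : Int) + 1 by push_cast; ring,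
        PySem.List.pyRange_one_succ_right (by positivity), List.foldl_append,
        ih (by omega)]
    have hget : PySem.List.pyGetD ps (k : Int) 0 = ps[k] := by
      simp [PySem.List.pyGetD_natCast, List.getD_eq_getElem?_getD, hk]
    have htake : ps.take (k + 1) = ps.take k ++ [ps[k]] := List.take_succ_eq_append_getElem hk
    simp only [List.foldl_cons, List.foldl_nil, hget, mttCnt, htake, List.countP_append]
    by_cases h : ps[k] > 3 <;> simp [h]

lemma mttOuter (ps : List Int) (n : Nat) (hn : n ≤ ps.length) (acc : List Int) :
    (PySem.List.pyRange 0 (n : Int) 1).foldl (mttStep ps) (0, acc)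
      = (0, acc ++ (List.range n).map (mttCnt ps)) := by
  induction n generalizing acc with
  | zero => simp [PySem.List.pyRange_one_eq_nil]
  | succ k ih =>
    rw [show ((k + 1 : Nat) : Int) = (k : Int) + 1 by push_cast; ring,
        PySem.List.pyRange_one_succ_right (by positivity), List.foldl_append,
        ih (by omega)]
    simp [mttStep, mttInner ps k (by omega), List.range_succ]

lemma mttB (ps : List Int) (c : Int) (acc : List Int) :
    (ps.foldl
      (fun (st : List Int × Int) x =>
        (st.1 ++ [st.2], if x > 3 then st.2 + 1 else st.2)) (acc, c)).1
    = acc ++ (List.range ps.length).map (fun k => c + mttCnt ps k) := by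
  induction ps generalizing c acc with
  | nil => simp
  | cons x xs ih =>
    have h0 : c + mttCnt (x :: xs) 0 = c := by simp [mttCnt]
    have hmap : ∀ k, c + mttCnt (x :: xs) (k + 1) = (if x > 3 then c + 1 else c) + mttCnt xs k := by
      intro k
      simp only [mttCnt, List.take_succ_cons, List.countP_cons]
      by_cases h : x > 3 <;> simp [h] <;> omega
    simp only [List.foldl_cons, ih, List.length_cons, List.range_succ_eq_map,
      List.map_cons, List.map_map, h0]
    simp [hmap]

-- ===== VERDICT (by name: the statement is the Claim_ definition above) =====
theorem more_than_three_spec : Claim_equal_more_than_three := by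
  intro ps _
  show more_than_three ps = more_than_three_alt ps
  rw [more_than_three, more_than_three_alt, mttOuter ps ps.length le_rfl [], mttB]
  simp
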